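-- pv_equiv track=rewrite | github.com/meng950813/school_enterprise_cooperation | web/service/social_network/recommend_detail.py | countIndustryPatent
-- ===== SOURCE A (Python) =====
-- def countIndustryPatent(ipc_industry, ipc_patent):
--     """
--     根据 ipc-patent 的数量关系 与 ipc-industry 对应关系， 统计 industry-patent的数量关系
--     :param ipc_industry: ipc-industry 对应关系: {ipc: set{industry_code, ...}}
--     :param ipc_patent:  ipc-patent的数量关系, dict 类型: {ipc: {p1,p2,...}, ...}
--     :return: dict类型，{industry_code: {p1, p2, ...}, ....}
--     """
--     industry_patent = {}
--     for ipc, patent in ipc_patent.items():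
--         if ipc not in ipc_industry:
--             continue
--         for industry in ipc_industry[ipc]:
--             if industry not in industry_patent:
--                 industry_patent[industry] = set()
--             # patent => {p1,p2,...}
--             for p in patent:
--                 industry_patent[industry].add(p)
--
--     return industry_patent
-- ===== SOURCE B (Python) =====
-- def countIndustryPatent(ipc_industry, ipc_patent):
--     # Two-pass rewrite: first build a reverse index industry -> list of its ipcs,
--     # then union each industry's patent sets; empty unions still yield an entry.
--     industry_to_ipcs = {}
--     for ipc in ipc_patent:
--         if ipc not in ipc_industry:
--             continue
--         for industry in ipc_industry[ipc]:
--             industry_to_ipcs.setdefault(industry, []).append(ipc)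
--     industry_patent = {}
--     for industry, ipcs in industry_to_ipcs.items():
--         s = set()
--         for i in ipcs:
--             s.update(ipc_patent[i])
--         industry_patent[industry] = s
--     return industry_patent
-- ===== Notes on version B (the rewrite author's own statement) =====
-- stated objective: alternative
-- what changed: Replaces A's single triple-nested mutate-as-you-go accumulation with two passes: first build a reverse index industry -> list of its ipcs, then union each industry's patent sets from that index (empty unions still produce an entry).
import Mathlib
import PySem

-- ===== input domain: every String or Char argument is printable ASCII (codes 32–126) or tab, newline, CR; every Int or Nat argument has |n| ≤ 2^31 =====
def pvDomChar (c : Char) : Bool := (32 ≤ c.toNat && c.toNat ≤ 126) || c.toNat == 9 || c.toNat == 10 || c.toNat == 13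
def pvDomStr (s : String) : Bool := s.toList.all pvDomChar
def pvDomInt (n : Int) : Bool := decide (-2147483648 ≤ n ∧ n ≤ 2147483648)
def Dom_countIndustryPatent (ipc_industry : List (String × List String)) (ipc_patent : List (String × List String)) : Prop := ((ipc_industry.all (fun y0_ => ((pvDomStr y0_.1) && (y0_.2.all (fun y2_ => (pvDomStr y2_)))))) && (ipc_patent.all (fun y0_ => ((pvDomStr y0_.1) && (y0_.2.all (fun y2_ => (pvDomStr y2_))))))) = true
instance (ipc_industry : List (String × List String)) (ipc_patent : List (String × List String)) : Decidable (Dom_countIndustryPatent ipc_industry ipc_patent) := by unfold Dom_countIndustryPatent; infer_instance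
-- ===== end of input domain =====

-- B rebuilds the same industry->patent-set dict in two passes (reverse index industry->ipcs, then unions); alternative decomposition, same cost.


-- ===== PORT A =====
def countIndustryPatent (ipc_industry : List (String × List String)) (ipc_patent : List (String × List String)) : List (String × List String) :=
  (ipc_patent.foldl (fun (acc : PySem.Dict String (List String)) kv =>
      match (PySem.Dict.mk ipc_industry).get? kv.1 with
      | none => acc
      | some inds =>
        inds.foldl (fun acc industry =>
          let acc := if acc.contains industry then acc else acc.insert industry []
          kv.2.foldl (fun acc p => acc.modify industry [] (fun s => PySem.Set.add s p)) acc) acc)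
    PySem.Dict.empty).items

-- ===== PORT B =====
def countIndustryPatent_alt (ipc_industry : List (String × List String)) (ipc_patent : List (String × List String)) : List (String × List String) :=
  let idx : PySem.Dict String (List String) :=
    ipc_patent.foldl (fun idx kv =>
      match (PySem.Dict.mk ipc_industry).get? kv.1 with
      | none => idx
      | some inds =>
        inds.foldl (fun idx industry => idx.modify industry [] (fun l => l ++ [kv.1])) idx)
      PySem.Dict.empty
  (idx.items.foldl (fun (res : PySem.Dict String (List String)) p =>
      res.insert p.1 (p.2.foldl (fun s i => PySem.Set.update s ((PySem.Dict.mk ipc_patent).getD i [])) PySem.Set.empty))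
    PySem.Dict.empty).items

-- ===== PRECONDITION & SPEC =====
-- Pre_ excludes association lists with duplicate ipc keys in ipc_patent: those do not denote any
-- Python dict (Python dict keys are unique), so no Python call of A receives them.
def Pre_countIndustryPatent (ipc_industry : List (String × List String)) (ipc_patent : List (String × List String)) : Prop :=
  (ipc_patent.map Prod.fst).Nodup
instance (ipc_industry : List (String × List String)) (ipc_patent : List (String × List String)) : Decidable (Pre_countIndustryPatent ipc_industry ipc_patent) := by unfold Pre_countIndustryPatent; infer_instance
def pvWitness_countIndustryPatent : (List (String × List String)) × (List (String × List String)) :=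
  ([("A01", ["d1", "d2"]), ("B02", ["d2"])], [("A01", ["p1", "p2"]), ("B02", []), ("C03", ["p3"])])
def Spec_countIndustryPatent (ipc_industry : List (String × List String)) (ipc_patent : List (String × List String)) (out : List (String × List String)) : Prop := out = countIndustryPatent_alt ipc_industry ipc_patent
instance (ipc_industry : List (String × List String)) (ipc_patent : List (String × List String)) (out : List (String × List String)) : Decidable (Spec_countIndustryPatent ipc_industry ipc_patent out) := by unfold Spec_countIndustryPatent; infer_instance

-- ===== CLAIM (what is proved, stated in full; the proofs are below) =====
def Claim_equal_countIndustryPatent : Prop := ∀ (ipc_industry : List (String × List String)) (ipc_patent : List (String × List String)), Dom_countIndustryPatent ipc_industry ipc_patent → Pre_countIndustryPatent ipc_industry ipc_patent → Spec_countIndustryPatent ipc_industry ipc_patent (countIndustryPatent ipc_industry ipc_patent)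

-- ===== LEMMAS AND PROOFS =====

-- the union-of-patent-sets value B computes for a recorded list of ipcs
def pvU (ipc_patent : List (String × List String)) (l : List String) : List String :=
  l.foldl (fun s i => PySem.Set.update s ((PySem.Dict.mk ipc_patent).getD i [])) PySem.Set.empty

-- A's dict expressed as B's index with every value replaced by its union
def pvPhi (ipc_patent : List (String × List String)) (I : PySem.Dict String (List String)) : PySem.Dict String (List String) :=
  PySem.Dict.mk (I.items.map (fun p => (p.1, pvU ipc_patent p.2)))

def pvStepA (ipc_industry : List (String × List String)) (acc : PySem.Dict String (List String)) (kv : String × List String) : PySem.Dict String (List String) :=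
  match (PySem.Dict.mk ipc_industry).get? kv.1 with
  | none => acc
  | some inds =>
    inds.foldl (fun acc industry =>
      let acc := if acc.contains industry then acc else acc.insert industry []
      kv.2.foldl (fun acc p => acc.modify industry [] (fun s => PySem.Set.add s p)) acc) acc

def pvStepI (ipc_industry : List (String × List String)) (idx : PySem.Dict String (List String)) (kv : String × List String) : PySem.Dict String (List String) :=
  match (PySem.Dict.mk ipc_industry).get? kv.1 with
  | none => idx
  | some inds => inds.foldl (fun idx industry => idx.modify industry [] (fun l => l ++ [kv.1])) idx

lemma pvPortA_eq (ii ip : List (String × List String)) :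
    countIndustryPatent ii ip = (ip.foldl (pvStepA ii) PySem.Dict.empty).items := rfl

lemma pvPortB_eq (ii ip : List (String × List String)) :
    countIndustryPatent_alt ii ip =
      ((ip.foldl (pvStepI ii) PySem.Dict.empty).items.foldl
        (fun (res : PySem.Dict String (List String)) p => res.insert p.1 (pvU ip p.2))
        PySem.Dict.empty).items := rfl

-- modify twice at the same key composes
lemma pvModify_modify {ν : Type} (d : PySem.Dict String ν) (k : String) (d0 : ν) (f g : ν → ν) :
    (d.modify k d0 f).modify k d0 g = d.modify k d0 (fun x => g (f x)) := by
  simp [PySem.Dict.modify, PySem.Dict.getD_insert_self, PySem.Dict.insert_insert_self]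

-- inserting the present value back is the identity (unique keys)
lemma pvInsert_getD_self {ν : Type} (d : PySem.Dict String ν) (k : String) (d0 : ν)
    (hnd : d.keys.Nodup) (hc : d.contains k = true) :
    d.insert k (d.getD k d0) = d := by
  apply PySem.Dict.ext
  rw [PySem.Dict.items_insert_of_contains d _ hc]
  have : ∀ p ∈ d.items, (if (p.1 == k) = true then (k, d.getD k d0) else p) = p := by
    intro p hp
    by_cases h : p.1 = k
    · subst h
      have : d.getD p.1 d0 = p.2 := by
        have hpp : (p.1, p.2) ∈ d.items := by simpa using hp
        exact PySem.Dict.getD_of_mem_items d hpp hnd d0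
      simp [this]
    · simp [h]
  calc List.map (fun p => if (p.1 == k) = true then (k, d.getD k d0) else p) d.items
      = List.map id d.items := List.map_congr_left this
    _ = d.items := List.map_id d.items

-- a chain of modifies at one key is one modify with the folded function
lemma pvChain (ind : String) (pat : List String) :
    ∀ (f : List String → List String) (d : PySem.Dict String (List String)),
      pat.foldl (fun acc p => acc.modify ind [] (fun s => PySem.Set.add s p)) (d.modify ind [] f)
        = d.modify ind [] (fun s => pat.foldl PySem.Set.add (f s)) := by
  induction pat with
  | nil => intro f d; rfl
  | cons p rest ih =>
      intro f d
      rw [List.foldl_cons, pvModify_modify]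
      exact ih _ d

-- A's inner per-industry step is one modify with the whole patent fold
lemma pvStepAInd_eq (pat : List String) (D : PySem.Dict String (List String)) (ind : String)
    (hnd : D.keys.Nodup) :
    (let D' := if D.contains ind then D else D.insert ind []
     pat.foldl (fun acc p => acc.modify ind [] (fun s => PySem.Set.add s p)) D')
    = D.modify ind [] (fun s => pat.foldl PySem.Set.add s) := by
  by_cases hc : D.contains ind = true
  · simp only [hc, if_pos]
    cases pat with
    | nil =>
        show D = D.modify ind [] (fun s => List.foldl PySem.Set.add s [])
        simp only [List.foldl_nil, PySem.Dict.modify]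
        exact (pvInsert_getD_self D ind [] hnd hc).symm
    | cons p rest =>
        rw [List.foldl_cons]
        show rest.foldl _ (D.modify ind [] (fun s => PySem.Set.add s p)) = _
        rw [pvChain]
        rfl
  · have hc' : D.contains ind = false := by simpa using hc
    simp only [hc', Bool.false_eq_true, if_false]
    cases pat with
    | nil =>
        show D.insert ind [] = D.modify ind [] (fun s => List.foldl PySem.Set.add s [])
        simp only [PySem.Dict.modify, List.foldl_nil]
        rw [PySem.Dict.getD_of_not_contains D _ hc']
    | cons p rest =>
        rw [List.foldl_cons]
        have h1 : (D.insert ind []).modify ind [] (fun s => PySem.Set.add s p)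
            = D.modify ind [] (fun s => PySem.Set.add s p) := by
          simp [PySem.Dict.modify, PySem.Dict.getD_insert_self,
            PySem.Dict.insert_insert_self, PySem.Dict.getD_of_not_contains D _ hc']
        rw [h1, pvChain]
        rfl

-- get?/getD/contains/keys of the value-mapped dict
lemma pvGet?_phi (ip : List (String × List String)) (I : PySem.Dict String (List String)) (k : String) :
    (pvPhi ip I).get? k = (I.get? k).map (pvU ip) := by
  simp only [pvPhi, PySem.Dict.get?]
  rw [List.find?_map]
  have hcomp : ((fun (p : String × List String) => p.1 == k) ∘ fun (p : String × List String) => (p.1, pvU ip p.2)) = fun p => p.1 == k := rfl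
  rw [hcomp]
  cases List.find? (fun p => p.1 == k) I.items <;> rfl

lemma pvContains_phi (ip : List (String × List String)) (I : PySem.Dict String (List String)) (k : String) :
    (pvPhi ip I).contains k = I.contains k := by
  rw [PySem.Dict.contains_eq_isSome_get?, PySem.Dict.contains_eq_isSome_get?, pvGet?_phi]
  cases I.get? k <;> rfl

lemma pvGetD_phi (ip : List (String × List String)) (I : PySem.Dict String (List String)) (k : String) :
    (pvPhi ip I).getD k [] = pvU ip (I.getD k []) := by
  rw [PySem.Dict.getD_eq_get?_getD, PySem.Dict.getD_eq_get?_getD, pvGet?_phi]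
  cases I.get? k with
  | none => rfl
  | some v => rfl

lemma pvKeys_phi (ip : List (String × List String)) (I : PySem.Dict String (List String)) :
    (pvPhi ip I).keys = I.keys := by
  simp [pvPhi, PySem.Dict.keys]

-- modify commutes with the value map pvU, given the pointwise condition
lemma pvPhi_modify (ip : List (String × List String)) (I : PySem.Dict String (List String))
    (k : String) (F : List String → List String) (g : List String → List String)
    (hF : ∀ l, F (pvU ip l) = pvU ip (g l)) :
    (pvPhi ip I).modify k [] F = pvPhi ip (I.modify k [] g) := by
  apply PySem.Dict.ext
  have hitems : ∀ (J : PySem.Dict String (List String)),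
      (pvPhi ip J).items = J.items.map (fun p => (p.1, pvU ip p.2)) := fun _ => rfl
  by_cases hc : I.contains k = true
  · have hcp : (pvPhi ip I).contains k = true := (pvContains_phi ip I k).trans hc
    simp only [PySem.Dict.modify]
    rw [PySem.Dict.items_insert_of_contains _ _ hcp, hitems, hitems,
        PySem.Dict.items_insert_of_contains _ _ hc, List.map_map, List.map_map]
    apply List.map_congr_left
    intro p _
    by_cases h : p.1 = k
    · simp only [Function.comp_apply, h, beq_self_eq_true, if_true]
      rw [pvGetD_phi, hF]
    · simp [Function.comp_apply, h]
  · have hc' : I.contains k = false := by simpa using hc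
    have hcp : (pvPhi ip I).contains k = false := (pvContains_phi ip I k).trans hc'
    simp only [PySem.Dict.modify]
    rw [PySem.Dict.items_insert_of_not_contains _ _ hcp, hitems, hitems,
        PySem.Dict.items_insert_of_not_contains _ _ hc', List.map_append]
    rw [PySem.Dict.getD_of_not_contains _ _ hcp, PySem.Dict.getD_of_not_contains _ _ hc']
    have hF0 : F [] = pvU ip (g []) := by simpa [pvU, PySem.Set.empty] using hF []
    simp [hF0]

-- lookups into an extended ipc_patent agree on old keys, and find the new one
lemma pvGetD_append_old (ip : List (String × List String)) (e : String × List String)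
    (i : String) (hi : i ∈ ip.map Prod.fst) :
    (PySem.Dict.mk (ip ++ [e])).getD i ([] : List String) = (PySem.Dict.mk ip).getD i [] := by
  simp only [PySem.Dict.getD, PySem.Dict.get?, List.find?_append]
  obtain ⟨p, hp, rfl⟩ := List.mem_map.mp hi
  have : (List.find? (fun q => q.1 == p.1) ip).isSome = true :=
    List.find?_isSome.mpr ⟨p, hp, by simp⟩
  cases h : List.find? (fun q => q.1 == p.1) ip with
  | none => rw [h] at this; simp at this
  | some v => simp

lemma pvGetD_append_new (ip : List (String × List String)) (e : String × List String)
    (he : e.1 ∉ ip.map Prod.fst) :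
    (PySem.Dict.mk (ip ++ [e])).getD e.1 ([] : List String) = e.2 := by
  simp only [PySem.Dict.getD, PySem.Dict.get?, List.find?_append]
  have : List.find? (fun q => q.1 == e.1) ip = none := by
    rw [List.find?_eq_none]
    intro q hq
    simp only [beq_iff_eq]
    intro hqe
    exact he (List.mem_map.mpr ⟨q, hq, hqe⟩)
  simp [this]

lemma pvU_frozen (ip : List (String × List String)) (e : String × List String) (l : List String)
    (hl : ∀ i ∈ l, i ∈ ip.map Prod.fst) :
    pvU (ip ++ [e]) l = pvU ip l := by
  unfold pvU
  refine PySem.List.foldl_congr_mem _ _ _ _ ?_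
  intro s i hi
  rw [pvGetD_append_old ip e i (hl i hi)]

lemma pvPhi_frozen (ip : List (String × List String)) (e : String × List String)
    (I : PySem.Dict String (List String))
    (hI : ∀ p ∈ I.items, ∀ i ∈ p.2, i ∈ ip.map Prod.fst) :
    pvPhi (ip ++ [e]) I = pvPhi ip I := by
  apply PySem.Dict.ext
  simp only [pvPhi]
  exact List.map_congr_left (fun p hp => by rw [pvU_frozen ip e p.2 (hI p hp)])

lemma pvNodup_keys_modify {ν : Type} (d : PySem.Dict String ν) (k : String) (d0 : ν) (f : ν → ν)
    (hnd : d.keys.Nodup) : (d.modify k d0 f).keys.Nodup := by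
  simp only [PySem.Dict.modify]
  have := PySem.Dict.nodup_keys_insert d k (f (d.getD k d0)) hnd
  exact this

-- values stored by the index step keep satisfying P
lemma pvVals_modify (I : PySem.Dict String (List String)) (k a : String)
    (P : String → Prop)
    (hI : ∀ p ∈ I.items, ∀ i ∈ p.2, P i) (ha : P a) :
    ∀ p ∈ (I.modify k [] (fun l => l ++ [a])).items, ∀ i ∈ p.2, P i := by
  intro p hp i hi
  simp only [PySem.Dict.modify] at hp
  rcases (PySem.Dict.mem_items_insert _ _ _ _).mp hp with h | ⟨h, _⟩
  · subst h
    simp only at hi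
    rcases List.mem_append.mp hi with h' | h'
    · cases hg : I.get? k with
      | none =>
          rw [PySem.Dict.getD_eq_get?_getD, hg] at h'
          simp at h'
      | some v =>
          rw [PySem.Dict.getD_eq_get?_getD, hg] at h'
          exact hI (k, v) (PySem.Dict.mem_items_of_get?_eq_some I hg) i (by simpa using h')
    · simp only [List.mem_singleton] at h'
      subst h'; exact ha
  · exact hI p h i hi

-- inner loop over the industries of one ipc
lemma pvInner (ip : List (String × List String)) (e : String × List String)
    (he : e.1 ∉ ip.map Prod.fst) (inds : List String) (P : String → Prop) (hPe : P e.1) :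
    ∀ (D I : PySem.Dict String (List String)),
    D = pvPhi (ip ++ [e]) I → I.keys.Nodup → (∀ p ∈ I.items, ∀ i ∈ p.2, P i) →
    (inds.foldl (fun acc industry =>
        let acc := if acc.contains industry then acc else acc.insert industry []
        e.2.foldl (fun acc p => acc.modify industry [] (fun s => PySem.Set.add s p)) acc) D
      = pvPhi (ip ++ [e]) (inds.foldl (fun idx industry => idx.modify industry [] (fun l => l ++ [e.1])) I))
    ∧ (inds.foldl (fun idx industry => idx.modify industry [] (fun l => l ++ [e.1])) I).keys.Nodup
    ∧ (∀ p ∈ (inds.foldl (fun idx industry => idx.modify industry [] (fun l => l ++ [e.1])) I).items, ∀ i ∈ p.2, P i) := by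
  induction inds with
  | nil => intro D I hD hnd hvals; exact ⟨hD, hnd, hvals⟩
  | cons ind rest ih =>
      intro D I hD hnd hvals
      rw [List.foldl_cons, List.foldl_cons]
      have hndD : D.keys.Nodup := by rw [hD, pvKeys_phi]; exact hnd
      have hstep : (let acc := if D.contains ind then D else D.insert ind []
          e.2.foldl (fun acc p => acc.modify ind [] (fun s => PySem.Set.add s p)) acc)
          = pvPhi (ip ++ [e]) (I.modify ind [] (fun l => l ++ [e.1])) := by
        rw [pvStepAInd_eq e.2 D ind hndD, hD]
        apply pvPhi_modify
        intro l
        unfold pvU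
        rw [List.foldl_append]
        simp only [List.foldl_cons, List.foldl_nil]
        rw [pvGetD_append_new ip e he]
        rfl
      rw [hstep]
      exact ih _ _ rfl (pvNodup_keys_modify I ind [] _ hnd) (pvVals_modify I ind e.1 P hvals hPe)

-- outer loop: A's dict is B's index with unioned values, plus the index invariants
lemma pvMain (ii ip : List (String × List String)) (hnd : (ip.map Prod.fst).Nodup) :
    ip.foldl (pvStepA ii) PySem.Dict.empty = pvPhi ip (ip.foldl (pvStepI ii) PySem.Dict.empty)
    ∧ (ip.foldl (pvStepI ii) PySem.Dict.empty).keys.Nodup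
    ∧ (∀ p ∈ (ip.foldl (pvStepI ii) PySem.Dict.empty).items, ∀ i ∈ p.2, i ∈ ip.map Prod.fst) := by
  induction ip using List.reverseRecOn with
  | nil => exact ⟨rfl, by simp [PySem.Dict.keys, PySem.Dict.empty], by simp [PySem.Dict.empty]⟩
  | append_singleton ip e ihfull =>
      have hnd' : (ip.map Prod.fst).Nodup ∧ e.1 ∉ ip.map Prod.fst := by
        rw [List.map_append] at hnd
        simp only [List.map_cons, List.map_nil] at hnd
        constructor
        · exact hnd.of_append_left
        · intro hmem
          have := List.disjoint_of_nodup_append hnd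
          exact this hmem (by simp)
      obtain ⟨hndip, he⟩ := hnd'
      obtain ⟨hA, hndI, hvals⟩ := ihfull hndip
      rw [List.foldl_append, List.foldl_append]
      simp only [List.foldl_cons, List.foldl_nil]
      set A0 := ip.foldl (pvStepA ii) PySem.Dict.empty with hA0
      set I0 := ip.foldl (pvStepI ii) PySem.Dict.empty with hI0
      have hfreeze : pvPhi ip I0 = pvPhi (ip ++ [e]) I0 := (pvPhi_frozen ip e I0 hvals).symm
      have hvals' : ∀ p ∈ I0.items, ∀ i ∈ p.2, i ∈ (ip ++ [e]).map Prod.fst := by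
        intro p hp i hi
        rw [List.map_append]
        exact List.mem_append_left _ (hvals p hp i hi)
      have hPe : e.1 ∈ (ip ++ [e]).map Prod.fst := by
        rw [List.map_append]; exact List.mem_append_right _ (by simp)
      cases hget : (PySem.Dict.mk ii).get? e.1 with
      | none =>
          simp only [pvStepA, pvStepI, hget]
          exact ⟨by rw [hA, hfreeze], hndI, hvals'⟩
      | some inds =>
          simp only [pvStepA, pvStepI, hget]
          exact pvInner ip e he inds (fun i => i ∈ (ip ++ [e]).map Prod.fst) hPe A0 I0
            (by rw [hA, hfreeze]) hndI hvals'

-- ===== VERDICT (by name: the statement is the Claim_ definition above) =====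
theorem countIndustryPatent_spec : Claim_equal_countIndustryPatent := by
  intro ii ip _ hpre
  unfold Spec_countIndustryPatent
  obtain ⟨hA, hndI, _⟩ := pvMain ii ip hpre
  rw [pvPortA_eq, pvPortB_eq, hA]
  rw [PySem.Dict.items_foldl_insert_fresh ((ip.foldl (pvStepI ii) PySem.Dict.empty).items)
      (fun p => p.1) (fun p => pvU ip p.2) PySem.Dict.empty
      (by intro a _; exact PySem.Dict.contains_empty _)
      (by simpa [PySem.Dict.keys] using hndI)]
  simp [pvPhi, PySem.Dict.empty]
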